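-- pv_equiv track=rewrite | github.com/basstal/LearnSICP | C2_BuildingAbstractionsWithData/Scripts/union_set_ordered.py | union_set
-- ===== SOURCE A (Python) =====
-- def union_set(set1, set2):
--     if set1 is None or len(set1) == 0:
--         return set2
--     elif set2 is None or len(set2) == 0:
--         return set1
--     elif set1[0] < set2[0]:
--         r = [set1[0]]
--         r.extend(union_set(set1[1:], set2))
--         return r
--     elif set1[0] == set2[0]:
--         r = [set1[0]]
--         r.extend(union_set(set1[1:], set2[1:]))
--         return r
--     else:
--         r = [set2[0]]
--         r.extend(union_set(set1, set2[1:]))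
--         return r
-- ===== SOURCE B (Python) =====
-- def union_set(set1, set2):
--     if set1 is None or len(set1) == 0:
--         return set2
--     if set2 is None or len(set2) == 0:
--         return set1
--     n, m = len(set1), len(set2)
--     out = []
--     i = j = 0
--     while i < n and j < m:
--         a, b = set1[i], set2[j]
--         if a < b:
--             out.append(a)
--             i += 1
--         elif a == b:
--             out.append(a)
--             i += 1
--             j += 1
--         else:
--             out.append(b)
--             j += 1
--     return out + set1[i:] + set2[j:]
-- ===== Notes on version B (the rewrite author's own statement) =====
-- stated objective: alternative
-- what changed: Replaced A's non-tail recursion, which copies a whole list tail with set1[1:]/set2[1:] and allocates a fresh result list at every step, by a single iterative two-pointer loop over indices into the untouched input lists with one output accumulator.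
import Mathlib
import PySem

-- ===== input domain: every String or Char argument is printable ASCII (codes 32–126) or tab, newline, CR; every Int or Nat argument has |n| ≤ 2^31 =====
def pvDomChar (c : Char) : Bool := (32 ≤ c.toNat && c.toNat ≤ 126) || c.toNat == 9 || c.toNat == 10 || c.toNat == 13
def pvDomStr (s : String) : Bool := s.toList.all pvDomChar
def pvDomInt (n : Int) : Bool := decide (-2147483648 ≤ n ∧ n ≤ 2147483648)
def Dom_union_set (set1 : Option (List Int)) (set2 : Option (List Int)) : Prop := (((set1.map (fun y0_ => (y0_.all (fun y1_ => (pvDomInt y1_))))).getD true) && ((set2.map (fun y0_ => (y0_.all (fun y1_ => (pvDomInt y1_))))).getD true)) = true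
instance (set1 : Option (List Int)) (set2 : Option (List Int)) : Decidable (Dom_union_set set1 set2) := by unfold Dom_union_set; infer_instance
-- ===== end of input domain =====

-- B replaces A's slicing recursion by an iterative two-pointer index loop that never
-- copies list tails; equivalence of return values is proved on all inputs.

-- ===== PORT A =====
-- A's recursive calls always receive plain lists (the slices set1[1:]/set2[1:] are the
-- structural tails); this helper is that recursion, step for step.
def unionA (s1 s2 : List Int) : List Int :=
  match s1, s2 with
  | [], _ => s2
  | _, [] => s1
  | a :: t1, b :: t2 =>
    if a < b then a :: unionA t1 (b :: t2)
    else if a = b then a :: unionA t1 t2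
    else b :: unionA (a :: t1) t2

def union_set (set1 : Option (List Int)) (set2 : Option (List Int)) : Option (List Int) :=
  match set1 with
  | none => set2
  | some l1 =>
    if l1.length = 0 then set2
    else
      match set2 with
      | none => some l1
      | some l2 =>
        if l2.length = 0 then some l1
        else some (unionA l1 l2)

-- ===== PORT B =====
-- B's while-loop: the lists are never consumed, only the two Nat indices i, j advance;
-- `out` is the append-only Python accumulator, modelled reversed (cons = append) and
-- reversed back on exit; the final `out + set1[i:] + set2[j:]` becomes drops.
-- `fuel` only bounds the iteration count (the wrapper passes n + m, which the loop
-- never exhausts while `i < n && j < m` holds).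
def unionB (s1 s2 : List Int) : Nat → Nat → Nat → List Int → List Int
  | 0, i, j, out => out.reverse ++ s1.drop i ++ s2.drop j
  | fuel + 1, i, j, out =>
    if i < s1.length && j < s2.length then
      let a := s1.getD i 0
      let b := s2.getD j 0
      if a < b then unionB s1 s2 fuel (i + 1) j (a :: out)
      else if a = b then unionB s1 s2 fuel (i + 1) (j + 1) (a :: out)
      else unionB s1 s2 fuel i (j + 1) (b :: out)
    else out.reverse ++ s1.drop i ++ s2.drop j

def union_set_alt (set1 : Option (List Int)) (set2 : Option (List Int)) : Option (List Int) :=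
  match set1 with
  | none => set2
  | some l1 =>
    if l1 = [] then set2
    else
      match set2 with
      | none => some l1
      | some l2 =>
        if l2 = [] then some l1
        else some (unionB l1 l2 (l1.length + l2.length) 0 0 [])

-- ===== PRECONDITION & SPEC =====
def Spec_union_set (set1 : Option (List Int)) (set2 : Option (List Int)) (out : Option (List Int)) : Prop := out = union_set_alt set1 set2
instance (set1 : Option (List Int)) (set2 : Option (List Int)) (out : Option (List Int)) : Decidable (Spec_union_set set1 set2 out) := by unfold Spec_union_set; infer_instance

-- ===== CLAIM (what is proved, stated in full; the proofs are below) =====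
def Claim_equal_union_set : Prop := ∀ (set1 : Option (List Int)) (set2 : Option (List Int)), Dom_union_set set1 set2 → Spec_union_set set1 set2 (union_set set1 set2)

-- ===== LEMMAS AND PROOFS =====
-- Loop invariant: with enough fuel, the index loop produces the accumulator so far
-- followed by A's merge of the unconsumed suffixes.
theorem unionB_eq (s1 s2 : List Int) (fuel i j : Nat) (out : List Int)
    (h : s1.length - i + (s2.length - j) <= fuel) :
    unionB s1 s2 fuel i j out = out.reverse ++ unionA (s1.drop i) (s2.drop j) := by
  induction fuel generalizing i j out with
  | zero =>
    have hi : s1.length <= i := by omega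
    simp [unionB, List.drop_eq_nil_of_le hi, unionA]
  | succ fuel ih =>
    by_cases hij : i < s1.length && j < s2.length
    · have hi : i < s1.length := by simpa using (And.left (by simpa using hij))
      have hj : j < s2.length := by simpa using (And.right (by simpa using hij))
      have d1 : s1.drop i = s1[i] :: s1.drop (i + 1) := List.drop_eq_getElem_cons hi
      have d2 : s2.drop j = s2[j] :: s2.drop (j + 1) := List.drop_eq_getElem_cons hj
      have g1 : s1.getD i 0 = s1[i] := List.getD_eq_getElem s1 0 hi
      have g2 : s2.getD j 0 = s2[j] := List.getD_eq_getElem s2 0 hj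
      rw [unionB]
      simp only [hij, if_true, g1, g2]
      by_cases hlt : s1[i] < s2[j]
      · rw [if_pos hlt, ih (i + 1) j (s1[i] :: out) (by omega), d1, d2, unionA,
          if_pos hlt]
        simp [← d2]
      · rw [if_neg hlt]
        by_cases heq : s1[i] = s2[j]
        · rw [if_pos heq, ih (i + 1) (j + 1) (s1[i] :: out) (by omega), d1, d2,
            unionA, if_neg hlt, if_pos heq]
          simp
        · rw [if_neg heq, ih i (j + 1) (s2[j] :: out) (by omega), d1, d2, unionA,
            if_neg hlt, if_neg heq]
          simp [← d1]
    · rw [unionB]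
      simp only [hij]
      rcases Nat.lt_or_ge i s1.length with hi | hi
      · have hj : s2.length <= j := by
          by_contra hj
          exact hij (by simp [hi, Nat.lt_of_not_le hj])
        rw [List.drop_eq_nil_of_le hj]
        cases hd : s1.drop i with
        | nil => simp [unionA]
        | cons a t => simp [unionA]
      · rw [List.drop_eq_nil_of_le hi]
        simp [unionA]

-- ===== VERDICT (by name: the statement is the Claim_ definition above) =====
theorem union_set_spec : Claim_equal_union_set := by
  intro set1 set2 _
  unfold Spec_union_set union_set union_set_alt
  match set1, set2 with
  | none, _ => rfl
  | some l1, none =>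
    by_cases h1 : l1 = [] <;> simp [h1]
  | some l1, some l2 =>
    by_cases h1 : l1 = [] <;> by_cases h2 : l2 = [] <;>
      simp [h1, h2, List.length_eq_zero_iff, unionB_eq l1 l2 (l1.length + l2.length) 0 0 [] (by omega)]
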